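-- pv_equiv track=rewrite | github.com/serafinmoral/satsolver | tablaClausulas.py | createclusters
-- ===== SOURCE A (Python) =====
-- def createclusters (lista):
--     listasets = []
--     for cl in lista:
--         va = set(map(abs,cl))
--         encontrado = False
--         for x in listasets:
--             if va <= x:
--                 encontrado = True
--                 break
--
--         if not encontrado:
--             listasets.append(va)
--
--     i = 0
--     j = 1
--     while (i<len(listasets)-1):
--         if listasets[i] <= listasets[j]:
--             del listasets[i]
--             j = i+1
--         elif listasets[j] <= listasets[i]:
--             del listasets[j]
--             if j >= len(listasets):
--                 i += 1
--                 j = i+1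
--         else:
--             j += 1
--             if j >= len(listasets):
--                 i += 1
--                 j = i+1
--     listaclaus = []
--     for i in range(len(listasets)):
--         listaclaus.append([])
--
--
--     for cl in lista:
--         va = set(map(abs,cl))
--         for i in range(len(listasets)):
--             if va <= listasets[i]:
--                 listaclaus[i].append(cl)
--                 break
--
--     return(listasets,listaclaus)
-- ===== SOURCE B (Python) =====
-- def createclusters(lista):
--     # phase 1: keep a clause's variable-set unless it is covered by one already kept
--     seen = []
--     for cl in lista:
--         va = set(map(abs, cl))
--         if not any(va <= x for x in seen):
--             seen.append(va)
--     # phase 2: keep only the maximal sets (first-appearance order)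
--     listasets = [s for s in seen if not any(s < t for t in seen)]
--     # phase 3: each clause goes to the first cluster containing its variables
--     def first_fit(cl):
--         va = set(map(abs, cl))
--         for idx, s in enumerate(listasets):
--             if va <= s:
--                 return idx
--         return None
--     listaclaus = [[cl for cl in lista if first_fit(cl) == idx]
--                   for idx in range(len(listasets))]
--     return (listasets, listaclaus)
-- ===== Notes on version B (the rewrite author's own statement) =====
-- stated objective: simpler
-- what changed: A's in-place pairwise-deletion while-loop over (i, j) index pairs is replaced by a direct one-line maximality filter (keep a set iff no proper superset exists), and the clause buckets are built by per-bucket comprehensions over a first-fit index function instead of initialising empty lists and appending in place.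
import Mathlib
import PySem

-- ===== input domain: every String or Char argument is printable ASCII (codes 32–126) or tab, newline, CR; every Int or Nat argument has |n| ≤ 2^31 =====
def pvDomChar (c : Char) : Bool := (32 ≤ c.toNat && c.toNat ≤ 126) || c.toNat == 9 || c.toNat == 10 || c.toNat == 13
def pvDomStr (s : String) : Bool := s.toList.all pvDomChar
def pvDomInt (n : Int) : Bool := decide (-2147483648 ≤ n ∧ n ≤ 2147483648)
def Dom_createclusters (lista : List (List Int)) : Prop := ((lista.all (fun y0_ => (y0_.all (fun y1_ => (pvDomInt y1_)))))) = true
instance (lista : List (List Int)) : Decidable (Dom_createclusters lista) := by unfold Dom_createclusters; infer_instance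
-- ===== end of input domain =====

-- B replaces A's in-place pairwise-deletion while-loop by a direct maximality filter and builds the
-- clause buckets by per-bucket comprehensions instead of in-place appends (objective: simpler).

-- ===== PORT A =====
-- A's while-loop over (listasets, i, j) with in-place `del`; branches in Python order.
def pvLoopA (S : List (PySem.Set Int)) (i j : Nat) : List (PySem.Set Int) :=
  if _h : i + 1 < S.length then
    if PySem.Set.issubset (S.getD i []) (S.getD j []) then
      pvLoopA (S.eraseIdx i) i (i + 1)
    else if PySem.Set.issubset (S.getD j []) (S.getD i []) then
      if (S.eraseIdx j).length ≤ j then pvLoopA (S.eraseIdx j) (i + 1) (i + 2)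
      else pvLoopA (S.eraseIdx j) i j
    else
      if S.length ≤ j + 1 then pvLoopA S (i + 1) (i + 2)
      else pvLoopA S i (j + 1)
  else S
termination_by (S.length - i, S.length - j)
decreasing_by
  · simp only [List.length_eraseIdx]
    rw [if_pos (by omega)]
    exact Prod.Lex.left _ _ (by omega)
  · simp only [List.length_eraseIdx]
    split_ifs <;> exact Prod.Lex.left _ _ (by omega)
  · rename_i hlen
    simp only [List.length_eraseIdx] at hlen ⊢
    split_ifs at hlen ⊢ <;> exact Prod.Lex.left _ _ (by omega)
  · exact Prod.Lex.left _ _ (by omega)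
  · exact Prod.Lex.right _ (by omega)

def createclusters (lista : List (List Int)) : List (List Int) × List (List (List Int)) :=
  let listasets0 :=
    lista.foldl (fun listasets cl =>
      let va := PySem.Set.ofList (cl.map (fun x => |x|))
      if listasets.any (fun x => PySem.Set.issubset va x) then listasets
      else listasets ++ [va]) []
  let listasets := pvLoopA listasets0 0 1
  let listaclaus0 := (List.range listasets.length).foldl
      (fun acc _ => acc ++ [([] : List (List Int))]) []
  let listaclaus :=
    lista.foldl (fun claus cl =>
      let va := PySem.Set.ofList (cl.map (fun x => |x|))
      match (List.range listasets.length).find?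
          (fun i => PySem.Set.issubset va (listasets.getD i [])) with
      | some i => claus.modify i (fun b => b ++ [cl])
      | none => claus) listaclaus0
  (listasets, listaclaus)

-- ===== PORT B =====
def createclusters_alt (lista : List (List Int)) : List (List Int) × List (List (List Int)) :=
  let seen :=
    lista.foldl (fun seen cl =>
      let va := PySem.Set.ofList (cl.map (fun x => |x|))
      if seen.any (fun x => PySem.Set.issubset va x) then seen
      else seen ++ [va]) []
  let listasets := seen.filter (fun s =>
      !(seen.any (fun t => PySem.Set.issubset s t && !(PySem.Set.issubset t s))))
  let firstFit := fun (cl : List Int) =>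
      listasets.findIdx? (fun s => PySem.Set.issubset (PySem.Set.ofList (cl.map (fun x => |x|))) s)
  let listaclaus := (List.range listasets.length).map (fun idx =>
      lista.filter (fun cl => firstFit cl == some idx))
  (listasets, listaclaus)

-- ===== PRECONDITION & SPEC =====
def Spec_createclusters (lista : List (List Int)) (out : List (List Int) × List (List (List Int))) : Prop := out = createclusters_alt lista
instance (lista : List (List Int)) (out : List (List Int) × List (List (List Int))) : Decidable (Spec_createclusters lista out) := by unfold Spec_createclusters; infer_instance

-- ===== CLAIM (what is proved, stated in full; the proofs are below) =====
def Claim_equal_createclusters : Prop := ∀ (lista : List (List Int)), Dom_createclusters lista → Spec_createclusters lista (createclusters lista)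

-- ===== LEMMAS AND PROOFS =====

-- `pvP S`: no member of S is a subset of an earlier member (phase-1 invariant).
def pvP (S : List (PySem.Set Int)) : Prop :=
  S.Pairwise (fun a b => ¬ (PySem.Set.issubset b a = true))

-- `pvMax S s`: s has no proper superset in S.
def pvMax (S : List (PySem.Set Int)) (s : PySem.Set Int) : Prop :=
  ∀ t ∈ S, PySem.Set.issubset s t = true → PySem.Set.issubset t s = true

-- B's filter predicate, named for the proofs.
def pvKeep (S : List (PySem.Set Int)) (s : PySem.Set Int) : Bool :=
  !(S.any (fun t => PySem.Set.issubset s t && !(PySem.Set.issubset t s)))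

theorem pvNotTrue {b : Bool} (h : ¬ b = true) : b = false := by
  cases b
  · rfl
  · exact absurd rfl h

theorem pvSub_refl (s : PySem.Set Int) : PySem.Set.issubset s s = true := by
  rw [PySem.Set.issubset_iff]
  exact fun x hx => hx

theorem pvSub_trans {a b c : PySem.Set Int}
    (h1 : PySem.Set.issubset a b = true) (h2 : PySem.Set.issubset b c = true) :
    PySem.Set.issubset a c = true := by
  rw [PySem.Set.issubset_iff] at *
  exact fun x hx => h2 x (h1 x hx)

theorem pvKeep_iff (S : List (PySem.Set Int)) (s : PySem.Set Int) :
    pvKeep S s = true ↔ pvMax S s := by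
  unfold pvKeep pvMax
  rw [Bool.not_eq_true', List.any_eq_false]
  constructor
  · intro h t ht hs
    have := h t ht
    cases hts : PySem.Set.issubset t s
    · rw [hs, hts] at this
      exact absurd (by decide : (true && !false) = true) this
    · rfl
  · intro h t ht
    cases hs : PySem.Set.issubset s t
    · rw [Bool.false_and]
      decide
    · rw [h t ht hs]
      decide


theorem pvKeep_eq_false_iff (S : List (PySem.Set Int)) (s : PySem.Set Int) :
    pvKeep S s = false ↔
      ∃ t ∈ S, PySem.Set.issubset s t = true ∧ PySem.Set.issubset t s = false := by
  unfold pvKeep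
  rw [Bool.not_eq_false', List.any_eq_true]
  constructor
  · rintro ⟨t, ht, hb⟩
    rw [Bool.and_eq_true, Bool.not_eq_true'] at hb
    exact ⟨t, ht, hb.1, hb.2⟩
  · rintro ⟨t, ht, h1, h2⟩
    exact ⟨t, ht, by rw [h1, h2]; rfl⟩

theorem pvP_getElem {S : List (PySem.Set Int)} (hP : pvP S) {m k : Nat}
    (hm : m < S.length) (hk : k < S.length) (hmk : m < k) :
    PySem.Set.issubset S[k] S[m] = false :=
  pvNotTrue (List.pairwise_iff_getElem.mp hP m k hm hk hmk)

-- a member at position k ≠ i survives `del S[i]`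
theorem pvMem_eraseIdx_of_ne {S : List (PySem.Set Int)} {k i : Nat}
    (hk : k < S.length) (hne : k ≠ i) : S[k] ∈ S.eraseIdx i := by
  rw [List.eraseIdx_eq_take_drop_succ]
  rcases Nat.lt_or_ge k i with h | h
  · apply List.mem_append_left
    refine List.mem_iff_getElem.mpr ⟨k, ?_, ?_⟩
    · rw [List.length_take]; omega
    · rw [List.getElem_take]
  · have hki : i < k := lt_of_le_of_ne h (Ne.symm hne)
    apply List.mem_append_right
    refine List.mem_iff_getElem.mpr ⟨k - (i + 1), ?_, ?_⟩
    · rw [List.length_drop]; omega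
    · rw [List.getElem_drop]
      congr 1
      omega

-- deleting a non-maximal element (S[i] ⊆ S[j], i < j) does not change the maximality filter
theorem pvFilter_keep_erase {S : List (PySem.Set Int)} {i j : Nat}
    (hP : pvP S) (hij : i < j) (hj : j < S.length)
    (hsub : PySem.Set.issubset (S[i]'(by omega)) S[j] = true) :
    S.filter (pvKeep S) = (S.eraseIdx i).filter (pvKeep (S.eraseIdx i)) := by
  have hi : i < S.length := by omega
  have hji : PySem.Set.issubset S[j] (S[i]'hi) = false := pvP_getElem hP hi hj hij
  have hcong : ∀ x ∈ S.eraseIdx i, pvKeep S x = pvKeep (S.eraseIdx i) x := by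
    intro x hx
    have hiff : pvKeep S x = false ↔ pvKeep (S.eraseIdx i) x = false := by
      rw [pvKeep_eq_false_iff, pvKeep_eq_false_iff]
      constructor
      · rintro ⟨t, ht, hxt, htx⟩
        by_cases htS' : t ∈ S.eraseIdx i
        · exact ⟨t, htS', hxt, htx⟩
        · -- t survives nowhere, so its only position was i : t = S[i]
          obtain ⟨k, hk, hkt⟩ := List.mem_iff_getElem.mp ht
          have hki : k = i := by
            by_contra hne
            exact htS' (hkt ▸ pvMem_eraseIdx_of_ne hk hne)
          subst hki
          subst hkt
          refine ⟨S[j], pvMem_eraseIdx_of_ne hj (by omega), pvSub_trans hxt hsub, ?_⟩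
          cases hjx : PySem.Set.issubset S[j] x
          · rfl
          · rw [pvSub_trans hsub hjx] at htx
            exact absurd htx (by intro hcon; cases hcon)
      · rintro ⟨t, ht, hxt, htx⟩
        exact ⟨t, List.mem_of_mem_eraseIdx ht, hxt, htx⟩
    cases hA : pvKeep S x <;> cases hB : pvKeep (S.eraseIdx i) x
    · rfl
    · exact absurd (hiff.mp hA) (by rw [hB]; intro hcon; cases hcon)
    · exact absurd (hiff.mpr hB) (by rw [hA]; intro hcon; cases hcon)
    · rfl
  have hdropKeep : pvKeep S (S[i]'hi) = false := by
    rw [pvKeep_eq_false_iff]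
    exact ⟨S[j], List.getElem_mem hj, hsub, hji⟩
  calc S.filter (pvKeep S)
      = (S.take i ++ (S[i]'hi) :: S.drop (i + 1)).filter (pvKeep S) := by
        rw [← List.drop_eq_getElem_cons hi, List.take_append_drop]
    _ = (S.take i).filter (pvKeep S) ++ (S.drop (i + 1)).filter (pvKeep S) := by
        rw [List.filter_append, List.filter_cons, hdropKeep]
        rfl
    _ = (S.take i).filter (pvKeep (S.eraseIdx i)) ++ (S.drop (i + 1)).filter (pvKeep (S.eraseIdx i)) := by
        rw [List.filter_congr (fun x hx => hcong x (by
              rw [List.eraseIdx_eq_take_drop_succ]; exact List.mem_append_left _ hx)),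
            List.filter_congr (fun x hx => hcong x (by
              rw [List.eraseIdx_eq_take_drop_succ]; exact List.mem_append_right _ hx))]
    _ = (S.eraseIdx i).filter (pvKeep (S.eraseIdx i)) := by
        rw [List.eraseIdx_eq_take_drop_succ, List.filter_append]

-- the while-loop, started in a P-state, computes exactly the maximality filter
theorem pvLoopA_eq_filter : ∀ (S : List (PySem.Set Int)) (i j : Nat),
    pvP S → i < j → (i + 1 < S.length → j < S.length) →
    (∀ m (_ : m < S.length), m < i → pvMax S S[m]) →
    (∀ k (_ : k < S.length), i < k → k < j →
        PySem.Set.issubset (S.getD i []) S[k] = false) →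
    pvLoopA S i j = S.filter (pvKeep S) := by
  intro S i j
  induction S, i, j using pvLoopA.induct with
  | case1 S i j hguard hbr1 ih =>
    intro hP hij hjlt hpre _hmid
    have hj : j < S.length := hjlt hguard
    have hi : i < S.length := by omega
    have hbr1' := hbr1
    rw [List.getD_eq_getElem S [] hi, List.getD_eq_getElem S [] hj] at hbr1'
    have hpre' : ∀ m (_ : m < (S.eraseIdx i).length), m < i →
        pvMax (S.eraseIdx i) ((S.eraseIdx i)[m]) := by
      intro m hm hmi
      have hmS : m < S.length := by
        rw [List.length_eraseIdx] at hm; split at hm <;> omega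
      have hval : (S.eraseIdx i)[m] = S[m] := by
        rw [List.getElem_eraseIdx hm, dif_pos hmi]
      rw [hval]
      intro t ht hst
      exact hpre m hmS hmi t (List.mem_of_mem_eraseIdx ht) hst
    rw [pvLoopA]
    rw [dif_pos hguard, if_pos hbr1,
        ih (hP.sublist (List.eraseIdx_sublist S i)) (by omega) (fun h => h) hpre'
          (fun k _ h1 h2 => by omega)]
    exact (pvFilter_keep_erase hP hij hj hbr1').symm
  | case2 S i j hguard hbr1 hbr2 hc ih =>
    intro hP hij hjlt _hpre _hmid
    have hj : j < S.length := hjlt hguard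
    have hi : i < S.length := by omega
    have hbr2' := hbr2
    rw [List.getD_eq_getElem S [] hj, List.getD_eq_getElem S [] hi,
        pvP_getElem hP hi hj hij] at hbr2'
    exact absurd hbr2' (by intro hcon; cases hcon)
  | case3 S i j hguard hbr1 hbr2 hc ih =>
    intro hP hij hjlt _hpre _hmid
    have hj : j < S.length := hjlt hguard
    have hi : i < S.length := by omega
    have hbr2' := hbr2
    rw [List.getD_eq_getElem S [] hj, List.getD_eq_getElem S [] hi,
        pvP_getElem hP hi hj hij] at hbr2'
    exact absurd hbr2' (by intro hcon; cases hcon)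
  | case4 S i j hguard hbr1 hbr2 hc ih =>
    intro hP hij hjlt hpre hmid
    have hj : j < S.length := hjlt hguard
    have hi : i < S.length := by omega
    rw [pvLoopA]
    rw [dif_pos hguard, if_neg hbr1, if_neg hbr2, if_pos hc]
    refine ih hP (by omega) (fun h => by omega) ?_ (fun k _ h1 h2 => by omega)
    -- every m < i + 1 is maximal; the new case is m = i
    intro m hm hmi
    rcases Nat.lt_or_ge m i with h | h
    · exact hpre m hm h
    · have hmieq : m = i := by omega
      subst hmieq
      intro t ht hst
      obtain ⟨k, hk, hkt⟩ := List.mem_iff_getElem.mp ht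
      subst hkt
      rcases Nat.lt_trichotomy k m with hkm | hkm | hkm
      · rw [pvP_getElem hP hk hm hkm] at hst
        cases hst
      · subst hkm
        exact pvSub_refl _
      · rcases Nat.lt_or_ge k j with hkj' | hkj'
        · rw [← List.getD_eq_getElem S [] hm] at hst
          rw [hmid k hk hkm hkj'] at hst
          cases hst
        · have hkj : k = j := by omega
          subst hkj
          have hbr1' := hbr1
          rw [List.getD_eq_getElem S [] hm, List.getD_eq_getElem S [] hk] at hbr1'
          exact absurd hst hbr1'
  | case5 S i j hguard hbr1 hbr2 hc ih =>
    intro hP hij hjlt hpre hmid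
    have hj : j < S.length := hjlt hguard
    have hi : i < S.length := by omega
    rw [pvLoopA]
    rw [dif_pos hguard, if_neg hbr1, if_neg hbr2, if_neg hc]
    refine ih hP (by omega) (fun _ => by omega) hpre ?_
    intro k hk h1 h2
    rcases Nat.lt_or_ge k j with hkj | hkj
    · exact hmid k hk h1 hkj
    · have hkj' : k = j := by omega
      subst hkj'
      have hbr1' := hbr1
      rw [List.getD_eq_getElem S [] hi, List.getD_eq_getElem S [] hk] at hbr1'
      rw [List.getD_eq_getElem S [] hi]
      exact pvNotTrue hbr1'
  | case6 S i j hguard =>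
    intro hP hij hjlt hpre _hmid
    rw [pvLoopA, dif_neg hguard]
    symm
    rw [List.filter_eq_self]
    intro a ha
    rw [pvKeep_iff]
    obtain ⟨m, hm, hma⟩ := List.mem_iff_getElem.mp ha
    subst hma
    rcases Nat.lt_or_ge m i with h | h
    · exact hpre m hm h
    · have hmi : m = i := by omega
      subst hmi
      intro t ht hst
      obtain ⟨k, hk, hkt⟩ := List.mem_iff_getElem.mp ht
      subst hkt
      rcases Nat.lt_trichotomy k m with hkm | hkm | hkm
      · rw [pvP_getElem hP hk hm hkm] at hst
        cases hst
      · subst hkm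
        exact pvSub_refl _
      · omega

-- phase 1 produces a list in which no member is ⊆ an earlier member
theorem pvPhase1_P (lista : List (List Int)) :
    ∀ acc, pvP acc →
    pvP (lista.foldl (fun listasets cl =>
      let va := PySem.Set.ofList (cl.map (fun x => |x|))
      if listasets.any (fun x => PySem.Set.issubset va x) then listasets
      else listasets ++ [va]) acc) := by
  induction lista with
  | nil => exact fun acc h => h
  | cons cl rest ih =>
    intro acc hacc
    rw [List.foldl_cons]
    apply ih
    simp only
    split
    · exact hacc
    · rename_i hany
      rw [pvP, List.pairwise_append]
      refine ⟨hacc, List.pairwise_singleton _ _, ?_⟩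
      intro a ha b hb
      rw [List.mem_singleton] at hb
      subst hb
      intro hsub
      exact hany (List.any_eq_true.mpr ⟨a, ha, hsub⟩)

-- A's first-fit index search over range(len) = B's findIdx?
theorem pvFind_range_eq_findIdx? (T : List (PySem.Set Int)) (p : PySem.Set Int → Bool) :
    (List.range T.length).find? (fun i => p (T.getD i [])) = T.findIdx? p := by
  induction T with
  | nil => rfl
  | cons x xs ih =>
    rw [List.length_cons, List.range_succ_eq_map, List.findIdx?_cons]
    cases hp : p x with
    | true =>
      rw [List.find?_cons_of_pos (p := fun i => p ((x :: xs).getD i []))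
            (a := 0) (l := List.map Nat.succ (List.range xs.length)) (by exact hp),
          if_pos rfl]
    | false =>
      rw [List.find?_cons_of_neg (p := fun i => p ((x :: xs).getD i []))
            (a := 0) (l := List.map Nat.succ (List.range xs.length)) (by
              intro hcon
              have hpx : p x = true := hcon
              rw [hp] at hpx
              cases hpx),
          if_neg Bool.false_ne_true]
      rw [List.find?_map]
      have hcomp : ((fun i => p ((x :: xs).getD i [])) ∘ Nat.succ) = (fun i => p (xs.getD i [])) := rfl
      rw [hcomp, ih]

-- A's empty-buckets initialiser is replicate
theorem pvInit_replicate (n : Nat) :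
    ∀ acc : List (List (List Int)),
      (List.range n).foldl (fun acc _ => acc ++ [([] : List (List Int))]) acc
        = acc ++ List.replicate n [] := by
  induction n with
  | zero => intro acc; rw [List.range_zero, List.foldl_nil, List.replicate_zero, List.append_nil]
  | succ m ih =>
    intro acc
    rw [List.range_succ, List.foldl_append, List.foldl_cons, List.foldl_nil, ih,
        List.replicate_succ', ← List.append_assoc]

-- distributing clauses over first-fit indices: A's fold of in-place appends = B's per-bucket filters
theorem pvBuckets (n : Nat) (g : List Int → Option Nat)
    (hg : ∀ cl i, g cl = some i → i < n) (L : List (List Int)) :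
    L.foldl (fun claus cl =>
        match g cl with
        | some i => claus.modify i (fun b => b ++ [cl])
        | none => claus) (List.replicate n []) =
      (List.range n).map (fun idx => L.filter (fun cl => g cl == some idx)) := by
  induction L using List.reverseRecOn with
  | nil =>
    symm
    rw [show (fun idx => List.filter (fun cl => g cl == some idx) ([] : List (List Int)))
          = Function.const Nat ([] : List (List Int)) from rfl]
    rw [List.map_const, List.length_range]
    rfl
  | append_singleton L cl ih =>
    rw [List.foldl_append, List.foldl_cons, List.foldl_nil, ih]
    cases hcl : g cl with
    | none =>
      apply List.map_congr_left
      intro idx _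
      rw [List.filter_append, List.filter_cons, List.filter_nil,
          show ((g cl == some idx) = false) from by rw [hcl]; rfl,
          if_neg Bool.false_ne_true, List.append_nil]
    | some i =>
      have hin : i < n := hg cl i hcl
      apply List.ext_getElem
      · rw [List.length_modify, List.length_map, List.length_map]
      · intro k h1 h2
        have hkn : k < n := by
          rw [List.length_modify, List.length_map, List.length_range] at h1
          exact h1
        rw [List.getElem_modify]
        conv_lhs => rw [List.getElem_map, List.getElem_range]
        conv_rhs => rw [List.getElem_map, List.getElem_range]
        rw [List.filter_append, List.filter_cons, List.filter_nil]
        by_cases hik : i = k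
        · subst hik
          rw [if_pos rfl, show ((g cl == some i) = true) from by rw [hcl]; exact beq_self_eq_true _,
              if_pos rfl]
        · rw [if_neg hik, show ((g cl == some k) = false) from by
              rw [hcl]; exact beq_eq_false_iff_ne.mpr (fun hco => hik (Option.some.inj hco)),
              if_neg Bool.false_ne_true, List.append_nil]

theorem pvMain (lista : List (List Int)) : createclusters lista = createclusters_alt lista := by
  simp only [createclusters, createclusters_alt]
  set S0 := lista.foldl (fun listasets cl =>
      let va := PySem.Set.ofList (cl.map (fun x => |x|))
      if listasets.any (fun x => PySem.Set.issubset va x) then listasets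
      else listasets ++ [va]) [] with hS0
  have hP : pvP S0 := pvPhase1_P lista [] List.Pairwise.nil
  have hloop : pvLoopA S0 0 1 = S0.filter (fun s =>
      !(S0.any (fun t => PySem.Set.issubset s t && !(PySem.Set.issubset t s)))) :=
    pvLoopA_eq_filter S0 0 1 hP (by omega) (fun h => by omega)
      (fun m _ hmi => by omega) (fun k _ h1 h2 => by omega)
  rw [hloop]
  set T := S0.filter (fun s =>
      !(S0.any (fun t => PySem.Set.issubset s t && !(PySem.Set.issubset t s)))) with hT
  refine congrArg _ ?_
  rw [pvInit_replicate T.length [], List.nil_append]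
  have hfold : (fun (claus : List (List (List Int))) (cl : List Int) =>
        match (List.range T.length).find?
            (fun i => PySem.Set.issubset (PySem.Set.ofList (cl.map (fun x => |x|))) (T.getD i [])) with
        | some i => claus.modify i (fun b => b ++ [cl])
        | none => claus) =
      (fun (claus : List (List (List Int))) (cl : List Int) =>
        match T.findIdx? (fun s => PySem.Set.issubset (PySem.Set.ofList (cl.map (fun x => |x|))) s) with
        | some i => claus.modify i (fun b => b ++ [cl])
        | none => claus) := by
    funext claus cl
    rw [pvFind_range_eq_findIdx? T
        (fun s => PySem.Set.issubset (PySem.Set.ofList (cl.map (fun x => |x|))) s)]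
  rw [hfold]
  exact pvBuckets T.length
    (fun cl => T.findIdx? (fun s => PySem.Set.issubset (PySem.Set.ofList (cl.map (fun x => |x|))) s))
    (fun cl i h => by
      have := List.findIdx?_eq_some_iff_findIdx_eq.mp h
      omega) lista

-- ===== VERDICT (by name: the statement is the Claim_ definition above) =====
theorem createclusters_spec : Claim_equal_createclusters :=
  fun lista _hdom => pvMain lista
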